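-- pv_equiv track=rewrite | github.com/adideshmukh2211/ai-test-case-generator | test_generator/generator.py | _parse_robot_file
-- ===== SOURCE A (Python) =====
-- def _parse_robot_file(content):
--     """Parse Robot Framework file content"""
--     sections = {}
--     current_section = None
--
--     for line in content.split('\n'):
--         if line.strip().startswith('***'):
--             current_section = line.strip().strip('*').strip()
--             sections[current_section] = []
--         elif current_section and line.strip():
--             sections[current_section].append(line)
--
--     return sections
-- ===== SOURCE B (Python) =====
-- def _parse_robot_file(content):
--     lines = content.split('\n')
--     sections = {}
--     k = 0
--     n = len(lines)
--     # skip any preamble before the first section header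
--     while k < n and not lines[k].strip().startswith('***'):
--         k += 1
--     # one outer iteration per section: collect its whole body, then store it at once
--     while k < n:
--         name = lines[k].strip().strip('*').strip()
--         k += 1
--         body = []
--         while k < n and not lines[k].strip().startswith('***'):
--             if name and lines[k].strip():
--                 body.append(lines[k])
--             k += 1
--         sections[name] = body
--     return sections
-- ===== Notes on version B (the rewrite author's own statement) =====
-- stated objective: alternative
-- what changed: A is a per-line state machine mutating the dict on every body line via a current-section variable; B parses section-at-a-time: it skips the preamble, then for each header collects the whole body with an inner loop and stores it into the dict once.
import Mathlib
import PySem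

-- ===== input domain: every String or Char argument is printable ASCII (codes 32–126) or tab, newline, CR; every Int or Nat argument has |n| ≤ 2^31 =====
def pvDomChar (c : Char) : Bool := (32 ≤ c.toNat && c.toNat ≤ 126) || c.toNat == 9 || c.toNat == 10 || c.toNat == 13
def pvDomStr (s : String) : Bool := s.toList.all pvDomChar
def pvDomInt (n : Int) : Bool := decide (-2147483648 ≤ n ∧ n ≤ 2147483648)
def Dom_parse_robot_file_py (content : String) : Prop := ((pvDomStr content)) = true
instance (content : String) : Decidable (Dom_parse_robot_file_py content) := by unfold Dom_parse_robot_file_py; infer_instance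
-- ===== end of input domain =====

-- B replaces A's per-line state machine (mutable current-section, per-line dict appends) by a
-- section-at-a-time parse: skip the preamble, then for each header collect the whole body before
-- one dict store; objective: alternative decomposition, same cost.

-- shared helpers: both Pythons literally compute line.strip().startswith('***') and
-- line.strip().strip('*').strip()
def pvIsHeader (line : String) : Bool := PySem.Str.startswith (PySem.Str.strip line) "***"

def pvNameOf (line : String) : String :=
  PySem.Str.strip (PySem.Str.stripChars (PySem.Str.strip line) "*")

-- content.split('\n'): exact for the nonempty separator '\n'
def pvSplitNL (content : String) : List String :=
  (PySem.Chars.splitOn content.toList ['\n']).map String.ofList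

-- ===== PORT A =====
-- one step of A's for-loop: state = (sections dict, current_section : Option String)
def pvStepA (st : PySem.Dict String (List String) × Option String) (line : String) :
    PySem.Dict String (List String) × Option String :=
  if pvIsHeader line then
    let name := pvNameOf line
    (st.1.insert name [], some name)
  else
    match st.2 with
    | some n =>
        -- 'current_section and line.strip()': both truthy
        if n ≠ "" ∧ PySem.Str.strip line ≠ "" then
          (st.1.modify n [] (· ++ [line]), some n)
        else st
    | none => st

def parse_robot_file_py (content : String) : List (String × List String) :=
  (((pvSplitNL content).foldl pvStepA (PySem.Dict.empty, none)).1).items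

-- ===== PORT B =====
-- first while loop: advance k past the preamble ≡ drop the non-header prefix
def pvSkipPre : List String → List String
  | [] => []
  | l :: rest => if pvIsHeader l then l :: rest else pvSkipPre rest

-- inner while loop: collect the section body (accumulator 'body'), return it with the unconsumed rest
def pvTakeBody (name : String) (body : List String) : List String → List String × List String
  | [] => (body, [])
  | l :: rest =>
      if pvIsHeader l then (body, l :: rest)
      else pvTakeBody name
        (if name ≠ "" ∧ PySem.Str.strip l ≠ "" then body ++ [l] else body) rest

theorem pvTakeBody_snd_length (name : String) (body : List String) (xs : List String) :
    (pvTakeBody name body xs).2.length ≤ xs.length := by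
  induction xs generalizing body with
  | nil => simp [pvTakeBody]
  | cons l rest ih =>
      simp only [pvTakeBody]
      split
      · simp
      · exact le_trans (ih _) (Nat.le_succ _)

-- outer while loop: one iteration per section header
def pvSections (d : PySem.Dict String (List String)) : List String → PySem.Dict String (List String)
  | [] => d
  | l :: rest =>
      let name := pvNameOf l
      let p := pvTakeBody name [] rest
      pvSections (d.insert name p.1) p.2
  termination_by xs => xs.length
  decreasing_by
    exact Nat.lt_succ_of_le (pvTakeBody_snd_length _ _ _)

def parse_robot_file_py_alt (content : String) : List (String × List String) :=
  (pvSections PySem.Dict.empty (pvSkipPre (pvSplitNL content))).items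

-- ===== PRECONDITION & SPEC =====
def Spec_parse_robot_file_py (content : String) (out : List (String × List String)) : Prop := out = parse_robot_file_py_alt content
instance (content : String) (out : List (String × List String)) : Decidable (Spec_parse_robot_file_py content out) := by unfold Spec_parse_robot_file_py; infer_instance

-- ===== CLAIM (what is proved, stated in full; the proofs are below) =====
def Claim_equal_parse_robot_file_py : Prop := ∀ (content : String), Dom_parse_robot_file_py content → Spec_parse_robot_file_py content (parse_robot_file_py content)

-- ===== LEMMAS AND PROOFS =====

-- appending to the value just inserted at key n
theorem pv_modify_insert (d : PySem.Dict String (List String)) (n : String)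
    (v : List String) (f : List String → List String) :
    (d.insert n v).modify n [] f = d.insert n (f v) := by
  simp [PySem.Dict.modify, PySem.Dict.getD_insert_self, PySem.Dict.insert_insert_self]

-- A's fold while inside section n whose body so far, acc, is stored at key n
theorem pv_fold_body (xs : List String) :
    ∀ (d : PySem.Dict String (List String)) (n : String) (acc : List String),
      (xs.foldl pvStepA (d.insert n acc, some n)).1 =
        pvSections (d.insert n (pvTakeBody n acc xs).1) (pvTakeBody n acc xs).2 := by
  induction xs with
  | nil => intro d n acc; simp [pvTakeBody, pvSections]
  | cons l rest ih =>
      intro d n acc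
      by_cases h : pvIsHeader l = true
      · simp only [List.foldl_cons, pvStepA, h, if_pos]
        rw [ih (d.insert n acc) (pvNameOf l) []]
        simp only [pvTakeBody, h, if_pos]
        rw [pvSections]
      · rw [Bool.not_eq_true] at h
        simp only [List.foldl_cons, pvStepA, h, Bool.false_eq_true, if_false]
        by_cases hc : n ≠ "" ∧ PySem.Str.strip l ≠ ""
        · rw [if_pos hc, pv_modify_insert, ih d n (acc ++ [l])]
          simp only [pvTakeBody, h, Bool.false_eq_true, if_false, if_pos hc]
        · rw [if_neg hc, ih d n acc]
          simp only [pvTakeBody, h, Bool.false_eq_true, if_false, if_neg hc]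

-- A's fold before any header has been seen
theorem pv_fold_pre (xs : List String) :
    ∀ (d : PySem.Dict String (List String)),
      (xs.foldl pvStepA (d, (none : Option String))).1 = pvSections d (pvSkipPre xs) := by
  induction xs with
  | nil => intro d; simp [pvSkipPre, pvSections]
  | cons l rest ih =>
      intro d
      by_cases h : pvIsHeader l = true
      · simp only [List.foldl_cons, pvStepA, h, if_pos]
        rw [pv_fold_body rest d (pvNameOf l) []]
        simp only [pvSkipPre, h, if_pos]
        rw [pvSections]
      · rw [Bool.not_eq_true] at h
        simp only [List.foldl_cons, pvStepA, h, Bool.false_eq_true, if_false]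
        rw [ih d]
        simp only [pvSkipPre, h, Bool.false_eq_true, if_false]

-- ===== VERDICT (by name: the statement is the Claim_ definition above) =====
theorem parse_robot_file_py_spec : Claim_equal_parse_robot_file_py := by
  intro content _
  unfold Spec_parse_robot_file_py parse_robot_file_py parse_robot_file_py_alt
  rw [pv_fold_pre]
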